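-- pv_equiv track=rewrite | github.com/quirtt/ProgDS | 1) Control Flow/SPECIAL number.py | is_special
-- ===== SOURCE A (Python) =====
-- def is_special(n):
--     digits = []
--     tmp = n
--     while(n > 0):
--         dig = n%10
--         n//=10
--         digits.append(dig)
--     prod_dig = 1
--     sum_dig = 0
--     for dig in digits:
--         prod_dig*=dig
--         sum_dig+=dig
--
--     return tmp == (prod_dig + sum_dig)
-- ===== SOURCE B (Python) =====
-- def is_special(n):
--     if n <= 0:
--         return False
--
--     def prod_sum(m):
--         if m == 0:
--             return (1, 0)
--         p, s = prod_sum(m // 10)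
--         d = m % 10
--         return (p * d, s + d)
--
--     p, s = prod_sum(n)
--     return n == p + s
-- ===== Notes on version B (the rewrite author's own statement) =====
-- stated objective: alternative
-- what changed: Replaces A's two-pass scheme (a while loop that materialises a digit list, then a for loop accumulating product and sum over it) by an early False guard plus one recursive helper that returns the (product, sum) pair directly, with no intermediate list.
import Mathlib
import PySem

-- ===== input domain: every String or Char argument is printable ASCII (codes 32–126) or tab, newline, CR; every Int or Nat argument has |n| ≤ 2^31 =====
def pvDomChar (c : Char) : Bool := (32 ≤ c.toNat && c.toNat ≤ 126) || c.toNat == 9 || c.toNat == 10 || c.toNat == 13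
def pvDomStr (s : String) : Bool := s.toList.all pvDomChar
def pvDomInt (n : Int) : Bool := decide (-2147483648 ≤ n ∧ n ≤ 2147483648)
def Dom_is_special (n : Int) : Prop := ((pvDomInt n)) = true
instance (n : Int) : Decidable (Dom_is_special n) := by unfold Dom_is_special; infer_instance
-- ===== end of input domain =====

-- B replaces A's two loops with an intermediate digit list by an early guard and one
-- recursive helper returning the (product, sum) pair directly; alternative decomposition, same cost.


-- ===== PORT A =====
-- the while loop: extract digits least-significant first into the list
def pvDigits (n : Int) (digits : List Int) : List Int :=
  if _h : 0 < n then
    pvDigits (PySem.Int.floordiv n 10) (digits ++ [PySem.Int.mod n 10])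
  else digits
termination_by n.toNat
decreasing_by
  rw [PySem.Int.floordiv_eq_ediv_of_pos (by omega)]
  omega

def is_special (n : Int) : Bool :=
  let digits := pvDigits n []
  let ps := digits.foldl (fun (acc : Int × Int) dig => (acc.1 * dig, acc.2 + dig)) (1, 0)
  decide (n = ps.1 + ps.2)

-- ===== PORT B =====
-- prod_sum is only ever called with m ≥ 0 (B guards n ≤ 0 first); the 'm ≤ 0' base case
-- coincides with Python's 'm == 0' there and only makes the Lean recursion total.
def pvProdSum (m : Int) : Int × Int :=
  if _h : m ≤ 0 then (1, 0)
  else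
    let ps := pvProdSum (PySem.Int.floordiv m 10)
    let d := PySem.Int.mod m 10
    (ps.1 * d, ps.2 + d)
termination_by m.toNat
decreasing_by
  rw [PySem.Int.floordiv_eq_ediv_of_pos (by omega)]
  omega

def is_special_alt (n : Int) : Bool :=
  if n ≤ 0 then false
  else decide (n = (pvProdSum n).1 + (pvProdSum n).2)

-- ===== PRECONDITION & SPEC =====
def Spec_is_special (n : Int) (out : Bool) : Prop := out = is_special_alt n
instance (n : Int) (out : Bool) : Decidable (Spec_is_special n out) := by unfold Spec_is_special; infer_instance

-- ===== CLAIM (what is proved, stated in full; the proofs are below) =====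
def Claim_equal_is_special : Prop := ∀ (n : Int), Dom_is_special n → Spec_is_special n (is_special n)

-- ===== LEMMAS AND PROOFS =====

-- the accumulator of A's while loop is a pure prefix
theorem pvDigits_acc (n : Int) (acc : List Int) : pvDigits n acc = acc ++ pvDigits n [] := by
  induction n using pvProdSum.induct generalizing acc with
  | case1 n h =>
    rw [pvDigits, dif_neg (by omega), pvDigits, dif_neg (by omega)]
    simp
  | case2 n h ih =>
    have h0 : (0:Int) < n := by omega
    conv_lhs => rw [pvDigits]
    conv_rhs => rw [pvDigits]
    rw [dif_pos h0, dif_pos h0, ih, ih ([] ++ [PySem.Int.mod n 10])]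
    simp

-- A's fold over the digit list computes B's recursive (product, sum) pair
theorem foldl_digits_eq (n : Int) (hn : 0 ≤ n) (p s : Int) :
    (pvDigits n []).foldl (fun (acc : Int × Int) dig => (acc.1 * dig, acc.2 + dig)) (p, s)
      = (p * (pvProdSum n).1, s + (pvProdSum n).2) := by
  induction n using pvProdSum.induct generalizing p s with
  | case1 m h =>
    rw [pvDigits, dif_neg (by omega), pvProdSum, dif_pos h]
    simp
  | case2 m h ih =>
    have h10 : PySem.Int.floordiv m 10 = m / 10 := PySem.Int.floordiv_eq_ediv_of_pos (by omega)
    rw [pvDigits, dif_pos (by omega), pvDigits_acc, pvProdSum, dif_neg h]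
    simp only [List.nil_append, List.singleton_append, List.foldl_cons]
    rw [ih (by rw [h10]; omega)]
    simp only [Prod.mk.injEq]
    exact ⟨by ring, by ring⟩

theorem is_special_spec' (n : Int) : is_special n = is_special_alt n := by
  by_cases h : n ≤ 0
  · rw [is_special, is_special_alt, if_pos h, pvDigits, dif_neg (by omega)]
    simp only [List.foldl_nil]
    simp only [decide_eq_false_iff_not]
    omega
  · rw [is_special, is_special_alt, if_neg h]
    simp only [foldl_digits_eq n (by omega) 1 0]
    norm_num

-- ===== VERDICT (by name: the statement is the Claim_ definition above) =====
theorem is_special_spec : Claim_equal_is_special := by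
  intro n _
  exact is_special_spec' n
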